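-- pv_equiv track=rewrite | github.com/zoskar/Binary_search | Mutual followers.py | solve
-- ===== SOURCE A (Python) =====
-- def solve(relations):
--     secik = set()
--     ppl = set()
--     for relation in relations:
--         tup = tuple(sorted(relation))
--         if tup in secik:
--             ppl.add(tup[0])
--             ppl.add(tup[1])
--         else:
--             secik.add(tup)
--     return sorted(list(ppl))
-- ===== SOURCE B (Python) =====
-- def solve(relations):
--     # Sort-then-scan: sort the normalized pairs lexicographically so that
--     # duplicates become adjacent, then collect endpoints of equal neighbours.
--     keys = sorted(sorted(r) for r in relations)
--     ppl = set()
--     for prev, cur in zip(keys, keys[1:]):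
--         if prev == cur:
--             ppl.add(cur[0])
--             ppl.add(cur[1])
--     return sorted(ppl)
-- ===== Notes on version B (the rewrite author's own statement) =====
-- stated objective: alternative
-- what changed: A detects repeated normalized pairs online with a hash seen-set inside one loop; B sorts the list of normalized pairs lexicographically so duplicates become adjacent, then scans adjacent neighbours for equality and collects their endpoints.
import Mathlib
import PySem

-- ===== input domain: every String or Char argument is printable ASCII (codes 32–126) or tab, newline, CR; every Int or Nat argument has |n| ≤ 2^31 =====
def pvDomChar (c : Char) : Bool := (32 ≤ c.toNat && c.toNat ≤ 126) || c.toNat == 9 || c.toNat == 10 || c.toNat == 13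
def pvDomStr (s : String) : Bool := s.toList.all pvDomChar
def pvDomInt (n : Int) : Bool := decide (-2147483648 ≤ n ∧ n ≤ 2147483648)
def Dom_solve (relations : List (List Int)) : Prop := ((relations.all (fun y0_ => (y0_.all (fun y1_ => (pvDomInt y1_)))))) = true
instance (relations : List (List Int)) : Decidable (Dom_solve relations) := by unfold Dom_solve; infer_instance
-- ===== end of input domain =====

-- B replaces A's online hash-set duplicate detection by sort-then-scan: sort the normalized
-- pairs lexicographically, then collect endpoints of equal adjacent neighbours; alternative structure.


-- ===== PORT A =====
-- for relation in relations: tup = tuple(sorted(relation)); if tup in secik: ppl.add(tup[0]); ppl.add(tup[1]) else secik.add(tup)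
-- tup[0]/tup[1] can raise IndexError in Python (excluded by Pre_); ported totally via pyGetD.
def solve (relations : List (List Int)) : List Int :=
  let st := relations.foldl
    (fun (st : PySem.Set (List Int) × PySem.Set Int) relation =>
      let tup := PySem.List.sorted relation (fun x => x)
      if PySem.Set.contains st.1 tup then
        (st.1, PySem.Set.add (PySem.Set.add st.2 (PySem.List.pyGetD tup 0 0)) (PySem.List.pyGetD tup 1 0))
      else
        (PySem.Set.add st.1 tup, st.2))
    (PySem.Set.empty, PySem.Set.empty)
  PySem.List.sorted st.2 (fun x => x)

-- ===== PORT B =====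
-- keys = sorted(sorted(r) for r in relations); for prev, cur in zip(keys, keys[1:]):
--   if prev == cur: ppl.add(cur[0]); ppl.add(cur[1]); return sorted(ppl)
-- cur[0]/cur[1] can raise IndexError in Python (excluded by Pre_); ported totally via pyGetD.
def solve_alt (relations : List (List Int)) : List Int :=
  let keys := PySem.List.sorted (relations.map (fun r => PySem.List.sorted r (fun x => x))) (fun x => x)
  let ppl := (keys.zip (keys.drop 1)).foldl
    (fun (p : PySem.Set Int) pc =>
      if pc.1 = pc.2 then
        PySem.Set.add (PySem.Set.add p (PySem.List.pyGetD pc.2 0 0)) (PySem.List.pyGetD pc.2 1 0)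
      else p)
    PySem.Set.empty
  PySem.List.sorted ppl (fun x => x)

-- ===== PRECONDITION & SPEC =====
-- Pre_ excludes exactly the inputs on which the Python A raises IndexError: a relation of
-- length < 2 whose normalized form occurs at least twice (tup[1] / tup[0] then fails).
def Pre_solve (relations : List (List Int)) : Prop :=
  ∀ r ∈ relations, 2 ≤ r.length ∨
    (relations.map (fun t => PySem.List.sorted t (fun x => x))).count (PySem.List.sorted r (fun x => x)) ≤ 1
instance (relations : List (List Int)) : Decidable (Pre_solve relations) := by unfold Pre_solve; infer_instance
def pvWitness_solve : List (List Int) := [[1, 2], [2, 1], [3, 4]]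
def Spec_solve (relations : List (List Int)) (out : List Int) : Prop := out = solve_alt relations
instance (relations : List (List Int)) (out : List Int) : Decidable (Spec_solve relations out) := by unfold Spec_solve; infer_instance

-- ===== CLAIM (what is proved, stated in full; the proofs are below) =====
def Claim_equal_solve : Prop := ∀ (relations : List (List Int)), Dom_solve relations → Pre_solve relations → Spec_solve relations (solve relations)

-- ===== LEMMAS AND PROOFS =====

-- abbreviations used only by the proofs
def pvG0 (k : List Int) : Int := PySem.List.pyGetD k 0 0
def pvG1 (k : List Int) : Int := PySem.List.pyGetD k 1 0
def pvKey (r : List Int) : List Int := PySem.List.sorted r (fun x => x)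

-- membership in B's adjacent-pair fold
theorem pvB_mem (items : List (List Int × List Int)) : ∀ (p : PySem.Set Int) (x : Int),
    x ∈ items.foldl
      (fun (p : PySem.Set Int) pc =>
        if pc.1 = pc.2 then
          PySem.Set.add (PySem.Set.add p (PySem.List.pyGetD pc.2 0 0)) (PySem.List.pyGetD pc.2 1 0)
        else p) p
    ↔ x ∈ p ∨ ∃ pc ∈ items, pc.1 = pc.2 ∧ (x = pvG0 pc.2 ∨ x = pvG1 pc.2) := by
  induction items with
  | nil => simp
  | cons pc rest ih =>
    intro p x
    simp only [List.foldl_cons]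
    by_cases h : pc.1 = pc.2
    · simp only [if_pos h, ih, PySem.Set.mem_add, List.mem_cons, pvG0, pvG1]
      constructor
      · rintro (((hp | h0) | h1) | ⟨pc', hm, hc, hx⟩)
        · exact Or.inl hp
        · exact Or.inr ⟨pc, Or.inl rfl, h, Or.inl h0⟩
        · exact Or.inr ⟨pc, Or.inl rfl, h, Or.inr h1⟩
        · exact Or.inr ⟨pc', Or.inr hm, hc, hx⟩
      · rintro (hp | ⟨pc', (rfl | hm), hc, hx⟩)
        · exact Or.inl (Or.inl (Or.inl hp))
        · rcases hx with rfl | rfl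
          · exact Or.inl (Or.inl (Or.inr rfl))
          · exact Or.inl (Or.inr rfl)
        · exact Or.inr ⟨pc', hm, hc, hx⟩
    · simp only [if_neg h, ih, List.mem_cons]
      constructor
      · rintro (hp | ⟨pc', hm, hc, hx⟩)
        · exact Or.inl hp
        · exact Or.inr ⟨pc', Or.inr hm, hc, hx⟩
      · rintro (hp | ⟨pc', (rfl | hm), hc, hx⟩)
        · exact Or.inl hp
        · exact absurd hc h
        · exact Or.inr ⟨pc', hm, hc, hx⟩

-- in a ≤-sorted list, a value occurs twice iff some adjacent pair equals it
theorem pvAdjDup (k : List Int) : ∀ (l : List (List Int)), l.Pairwise (· ≤ ·) →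
    ((∃ pc ∈ l.zip (l.drop 1), pc.1 = pc.2 ∧ pc.2 = k) ↔ 2 ≤ l.count k) := by
  intro l
  induction l with
  | nil => simp
  | cons a t ih =>
    intro hp
    rcases List.pairwise_cons.mp hp with ⟨hle, hpt⟩
    cases t with
    | nil =>
      constructor
      · rintro ⟨pc, hm, -⟩
        simp at hm
      · intro h2
        rw [List.count_cons, List.count_nil] at h2
        split at h2 <;> omega
    | cons b t' =>
      have hzip : (a :: b :: t').zip ((a :: b :: t').drop 1)
          = (a, b) :: ((b :: t').zip ((b :: t').drop 1)) := rfl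
      rw [hzip]
      have iht := ih hpt
      constructor
      · rintro ⟨pc, hm, heq, hk⟩
        rcases List.mem_cons.mp hm with rfl | hm'
        · -- the head pair: a = b = k, two occurrences at the front
          simp only at heq hk
          subst hk; subst heq
          simp
        · have h2 : 2 ≤ (b :: t').count k := iht.mp ⟨pc, hm', heq, hk⟩
          rw [List.count_cons]
          omega
      · intro h2
        by_cases hak : a = k
        · subst hak
          have hmem : a ∈ b :: t' := by
            rw [List.count_cons] at h2
            simp only [beq_self_eq_true, if_pos] at h2
            exact List.count_pos_iff.mp (by omega)
          have hab : a ≤ b := hle b (List.mem_cons_self ..)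
          have hba : b ≤ a := by
            rcases List.mem_cons.mp hmem with rfl | hm'
            · exact le_refl _
            · exact (List.pairwise_cons.mp hpt).1 a hm'
          have : b = a := le_antisymm hba hab
          exact ⟨(a, b), List.mem_cons_self .., this.symm ▸ rfl, this⟩
        · have : 2 ≤ (b :: t').count k := by
            rw [List.count_cons] at h2
            simp only [beq_iff_eq, if_neg hak] at h2
            omega
          obtain ⟨pc, hm, heq, hk⟩ := iht.mpr this
          exact ⟨pc, List.mem_cons_of_mem _ hm, heq, hk⟩

theorem pvOfList_append_singleton (ks : List (List Int)) (k : List Int) :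
    PySem.Set.ofList (ks ++ [k]) = PySem.Set.add (PySem.Set.ofList ks) k := by
  rw [PySem.Set.ofList_eq_foldl, PySem.Set.ofList_eq_foldl, List.foldl_append]
  rfl

theorem pvA_mem (l : List (List Int)) : ∀ (ks : List (List Int)) (p : PySem.Set Int) (x : Int),
    x ∈ (l.foldl
      (fun (st : PySem.Set (List Int) × PySem.Set Int) relation =>
        let tup := PySem.List.sorted relation (fun x => x)
        if PySem.Set.contains st.1 tup then
          (st.1, PySem.Set.add (PySem.Set.add st.2 (PySem.List.pyGetD tup 0 0)) (PySem.List.pyGetD tup 1 0))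
        else
          (PySem.Set.add st.1 tup, st.2))
      (PySem.Set.ofList ks, p)).2
    ↔ x ∈ p ∨ ∃ k, k ∈ l.map pvKey ∧ (k ∈ ks ∨ 2 ≤ (l.map pvKey).count k) ∧ (x = pvG0 k ∨ x = pvG1 k) := by
  induction l with
  | nil => simp
  | cons r rest ih =>
    intro ks p x
    simp only [List.foldl_cons, List.map_cons]
    by_cases hk : pvKey r ∈ ks
    · have hc : PySem.Set.contains (PySem.Set.ofList ks) (PySem.List.sorted r (fun x => x)) = true := by
        rw [PySem.Set.contains_iff, PySem.Set.mem_ofList]; exact hk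
      simp only [hc, if_true, ih, PySem.Set.mem_add]
      constructor
      · rintro (((hp | h0) | h1) | ⟨k, hm, hc', hx⟩)
        · exact Or.inl hp
        · exact Or.inr ⟨pvKey r, List.mem_cons_self .., Or.inl hk, Or.inl h0⟩
        · exact Or.inr ⟨pvKey r, List.mem_cons_self .., Or.inl hk, Or.inr h1⟩
        · refine Or.inr ⟨k, List.mem_cons_of_mem _ hm, ?_, hx⟩
          rcases hc' with h | h
          · exact Or.inl h
          · refine Or.inr ?_
            rw [List.count_cons]
            omega
      · rintro (hp | ⟨k, hm, hc', hx⟩)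
        · exact Or.inl (Or.inl (Or.inl hp))
        · rcases List.mem_cons.mp hm with rfl | hm'
          · rcases hx with rfl | rfl
            · exact Or.inl (Or.inl (Or.inr rfl))
            · exact Or.inl (Or.inr rfl)
          · by_cases hek : k = pvKey r
            · subst hek
              rcases hx with rfl | rfl
              · exact Or.inl (Or.inl (Or.inr rfl))
              · exact Or.inl (Or.inr rfl)
            · refine Or.inr ⟨k, hm', ?_, hx⟩
              rcases hc' with h | h
              · exact Or.inl h
              · refine Or.inr ?_
                simp only [List.count_cons, Ne.symm hek, beq_iff_eq, if_false] at h
                omega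
    · have hc : PySem.Set.contains (PySem.Set.ofList ks) (PySem.List.sorted r (fun x => x)) = false := by
        rw [Bool.eq_false_iff, Ne, PySem.Set.contains_iff, PySem.Set.mem_ofList]; exact hk
      rw [show (PySem.List.sorted r (fun x => x)) = pvKey r from rfl] at hc ⊢
      simp only [hc, Bool.false_eq_true, if_false, ← pvOfList_append_singleton, ih, List.mem_append,
        List.mem_singleton]
      constructor
      · rintro (hp | ⟨k, hm, hc', hx⟩)
        · exact Or.inl hp
        · refine Or.inr ⟨k, List.mem_cons_of_mem _ hm, ?_, hx⟩
          rcases hc' with (h | rfl) | h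
          · exact Or.inl h
          · refine Or.inr ?_
            have : 0 < (rest.map pvKey).count (pvKey r) := List.count_pos_iff.mpr hm
            simp only [List.count_cons, beq_self_eq_true, if_true]
            omega
          · simp only [List.count_cons]; omega
      · rintro (hp | ⟨k, hm, hc', hx⟩)
        · exact Or.inl hp
        · rcases List.mem_cons.mp hm with rfl | hm'
          · rcases hc' with h | h
            · exact absurd h hk
            · simp only [List.count_cons, beq_self_eq_true, if_true] at h
              have hmem : pvKey r ∈ rest.map pvKey := List.count_pos_iff.mp (by omega)
              exact Or.inr ⟨pvKey r, hmem, Or.inl (Or.inr rfl), hx⟩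
          · by_cases hek : k = pvKey r
            · subst hek
              exact Or.inr ⟨pvKey r, hm', Or.inl (Or.inr rfl), hx⟩
            · refine Or.inr ⟨k, hm', ?_, hx⟩
              rcases hc' with h | h
              · exact Or.inl (Or.inl h)
              · have hne : ¬ (pvKey r = k) := fun hh => hek hh.symm
                simp only [List.count_cons, beq_iff_eq, if_neg hne, add_zero] at h
                exact Or.inr h

theorem pvA_nodup (l : List (List Int)) : ∀ (st : PySem.Set (List Int) × PySem.Set Int), st.2.Nodup →
    (l.foldl
      (fun (st : PySem.Set (List Int) × PySem.Set Int) relation =>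
        let tup := PySem.List.sorted relation (fun x => x)
        if PySem.Set.contains st.1 tup then
          (st.1, PySem.Set.add (PySem.Set.add st.2 (PySem.List.pyGetD tup 0 0)) (PySem.List.pyGetD tup 1 0))
        else
          (PySem.Set.add st.1 tup, st.2))
      st).2.Nodup := by
  induction l with
  | nil => exact fun st h => h
  | cons r rest ih =>
    intro st h
    simp only [List.foldl_cons]
    apply ih
    dsimp only
    split
    · exact PySem.Set.nodup_add _ _ (PySem.Set.nodup_add _ _ h)
    · exact h

theorem pvB_nodup (items : List (List Int × List Int)) : ∀ (p : PySem.Set Int), p.Nodup →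
    (items.foldl
      (fun (p : PySem.Set Int) pc =>
        if pc.1 = pc.2 then
          PySem.Set.add (PySem.Set.add p (PySem.List.pyGetD pc.2 0 0)) (PySem.List.pyGetD pc.2 1 0)
        else p) p).Nodup := by
  induction items with
  | nil => exact fun p h => h
  | cons pc rest ih =>
    intro p hp
    simp only [List.foldl_cons]
    apply ih
    split
    · exact PySem.Set.nodup_add _ _ (PySem.Set.nodup_add _ _ hp)
    · exact hp

-- ===== VERDICT (by name: the statement is the Claim_ definition above) =====
theorem solve_spec : Claim_equal_solve := by
  intro relations _hdom _hpre
  unfold Spec_solve solve solve_alt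
  dsimp only
  set kmap := relations.map (fun r => PySem.List.sorted r (fun x => x)) with hkmap
  set keys := PySem.List.sorted kmap (fun x => x) with hkeys
  set pA := (relations.foldl
      (fun (st : PySem.Set (List Int) × PySem.Set Int) relation =>
        let tup := PySem.List.sorted relation (fun x => x)
        if PySem.Set.contains st.1 tup then
          (st.1, PySem.Set.add (PySem.Set.add st.2 (PySem.List.pyGetD tup 0 0)) (PySem.List.pyGetD tup 1 0))
        else
          (PySem.Set.add st.1 tup, st.2))
      (PySem.Set.empty, PySem.Set.empty)).2 with hpA
  set pB := (keys.zip (keys.drop 1)).foldl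
      (fun (p : PySem.Set Int) pc =>
        if pc.1 = pc.2 then
          PySem.Set.add (PySem.Set.add p (PySem.List.pyGetD pc.2 0 0)) (PySem.List.pyGetD pc.2 1 0)
        else p) PySem.Set.empty with hpB
  have hperm_keys : keys.Perm kmap := PySem.List.sorted_perm kmap (fun x => x) false
  have hinstEq : (fun (a b : List Int) => a.decidableLT b) = (LinearOrder.toDecidableLT (α := List Int)) :=
    Subsingleton.elim _ _
  have hsorted : keys.Pairwise (· ≤ ·) := by
    rw [hkeys, hinstEq]
    exact PySem.List.sorted_pairwise kmap (fun x => x)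
  have hnA : pA.Nodup := by rw [hpA]; exact pvA_nodup relations _ List.nodup_nil
  have hnB : pB.Nodup := by rw [hpB]; exact pvB_nodup _ _ List.nodup_nil
  have hmem : ∀ x : Int, x ∈ pB ↔ x ∈ pA := by
    intro x
    rw [hpA, hpB]
    have hA := pvA_mem relations [] PySem.Set.empty x
    rw [show PySem.Set.ofList ([] : List (List Int)) = (PySem.Set.empty : PySem.Set (List Int)) from rfl] at hA
    rw [hA, pvB_mem]
    rw [show (PySem.Set.empty : PySem.Set Int) = PySem.Set.ofList [] from rfl]
    simp only [PySem.Set.mem_ofList, List.not_mem_nil, false_or]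
    have hkm : kmap = relations.map pvKey := rfl
    constructor
    · rintro ⟨pc, hm, heq, hx⟩
      have hc : 2 ≤ keys.count pc.2 := (pvAdjDup pc.2 keys hsorted).mp ⟨pc, hm, heq, rfl⟩
      have hc' : 2 ≤ (relations.map pvKey).count pc.2 := by
        rw [← hkm, ← hperm_keys.count_eq]; exact hc
      exact ⟨pc.2, List.count_pos_iff.mp (by omega), hc', hx⟩
    · rintro ⟨k, hmemk, hc, hx⟩
      have hck : 2 ≤ keys.count k := by
        rw [hperm_keys.count_eq, hkm]; exact hc
      obtain ⟨pc, hm, heq, hk⟩ := (pvAdjDup k keys hsorted).mpr hck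
      exact ⟨pc, hm, heq, hk ▸ hx⟩
  have hperm : (PySem.List.sorted pB (fun x => x)).Perm pA :=
    (PySem.List.sorted_perm pB (fun x => x) false).trans
      ((List.perm_ext_iff_of_nodup hnB hnA).mpr hmem)
  have hlt : (PySem.List.sorted pB (fun x => x)).Pairwise (fun a b : Int => a < b) := by
    have h1 := PySem.List.sorted_pairwise pB (fun x => x)
    have h2 : (PySem.List.sorted pB (fun x => x)).Nodup :=
      (PySem.List.sorted_perm pB (fun x => x) false).nodup_iff.mpr hnB
    exact (h1.and h2).imp (fun {a b} hab => lt_of_le_of_ne hab.1 hab.2)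
  exact PySem.List.sorted_eq_of_perm_of_pairwise_lt pA (PySem.List.sorted pB (fun x => x)) (fun x => x) hperm hlt
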